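-- pv_equiv track=rewrite | github.com/EmmaMathieu/Comparateur_VCF | compare.py | mise_en_forme
-- ===== SOURCE A (Python) =====
-- def mise_en_forme(comparaisons: dict, str) -> str:
--     resultat = "\n" + str + "\n"
--     resultat += "\n-----------------------Premier echantillon-----------------------\n"
--     cles = list(comparaisons.keys())
--
--     for i, cle in enumerate(cles):
--         resultat += f"le couple de réplicat : {cle} a un nombre de variant commun égal à : {comparaisons[cle]}\n"
--         premier_tiret_cle = cle.index('-') if '-' in cle else len(cle)
--
--         if i < len(cles) - 1 and cle[:premier_tiret_cle] != cles[i + 1][:premier_tiret_cle]: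
--             resultat += "\n-----------------------Echantillon suivant-----------------------\n"
--     return resultat
-- ===== SOURCE B (Python) =====
-- def mise_en_forme(comparaisons: dict, str) -> str:
--     def prefixe(cle):
--         return cle.split('-', 1)[0]
--
--     # pass 1: group consecutive entries into sample groups
--     groupes = []
--     for cle, nb in comparaisons.items():
--         if groupes and cle.startswith(prefixe(groupes[-1][-1][0])):
--             groupes[-1].append((cle, nb))
--         else:
--             groupes.append([(cle, nb)])
--
--     # pass 2: render each group as one block
--     blocs = [
--         ''.join(f"le couple de réplicat : {c} a un nombre de variant commun égal à : {n}\n"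
--                 for c, n in groupe)
--         for groupe in groupes
--     ]
--
--     # pass 3: join the blocks with the sample separator
--     sep = "\n-----------------------Echantillon suivant-----------------------\n"
--     return ("\n" + str + "\n"
--             + "\n-----------------------Premier echantillon-----------------------\n"
--             + sep.join(blocs))
-- ===== Notes on version B (the rewrite author's own statement) =====
-- stated objective: alternative
-- what changed: A is one flat indexed loop that appends to a growing string and decides the separator by comparing dash-index slices of cles[i] and cles[i+1]; B has no index loop or lookahead at all: it first groups consecutive items into sample groups (new group when a key does not start with the previous key's pre-dash prefix), then renders each group as one block, and finally joins the blocks with the separator string.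
import Mathlib
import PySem

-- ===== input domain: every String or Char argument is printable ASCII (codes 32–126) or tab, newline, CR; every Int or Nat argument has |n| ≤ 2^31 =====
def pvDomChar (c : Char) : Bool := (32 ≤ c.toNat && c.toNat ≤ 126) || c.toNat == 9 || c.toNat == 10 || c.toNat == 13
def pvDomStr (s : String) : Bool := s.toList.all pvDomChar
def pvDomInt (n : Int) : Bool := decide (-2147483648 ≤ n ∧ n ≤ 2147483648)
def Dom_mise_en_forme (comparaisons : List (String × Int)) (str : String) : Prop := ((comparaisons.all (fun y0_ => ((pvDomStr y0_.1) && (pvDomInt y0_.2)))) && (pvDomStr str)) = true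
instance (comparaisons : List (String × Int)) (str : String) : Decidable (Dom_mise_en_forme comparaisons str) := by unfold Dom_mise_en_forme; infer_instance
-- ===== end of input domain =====

-- B replaces A's flat indexed loop (enumerate + cles[i+1] lookahead, dict lookup, dash-index slice
-- comparison, growing string) by three stages: group consecutive items into sample groups, render each
-- group as one block, join the blocks with the separator (objective: alternative decomposition; the
-- return values are proved equal). String internals are ported on List Char (PySem.Chars) and packed
-- with String.ofList at the end, which is exact.

-- ===== PORT A =====
def pvEnteteA : List Char := "\n-----------------------Premier echantillon-----------------------\n".toList
def pvSuivantA : List Char := "\n-----------------------Echantillon suivant-----------------------\n".toList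
-- f"le couple de réplicat : {cle} a un nombre de variant commun égal à : {v}\n"
def pvLigneA (cle : String) (v : Int) : List Char :=
  "le couple de réplicat : ".toList ++ cle.toList ++ " a un nombre de variant commun égal à : ".toList
    ++ PySem.Int.toChars v ++ ['\n']
-- premier_tiret_cle = cle.index('-') if '-' in cle else len(cle)   (index guarded by the membership test)
def pvTiretA (cle : String) : Int :=
  if PySem.Str.isIn "-" cle then PySem.Str.find cle "-" else PySem.Str.len cle

-- for i, cle in enumerate(cles): ...   (index recursion; cles[i] is the enumerated element;
-- comparaisons[cle] is getD: cle comes from comparaisons.keys(), so the lookup always succeeds)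
def pvBoucleA (d : PySem.Dict String Int) (cles : List String) (i : Nat) (resultat : List Char) : List Char :=
  if h : i < cles.length then
    pvBoucleA d cles (i + 1)
      (if (i : Int) < (cles.length : Int) - 1 ∧
          PySem.List.slice (cles[i].toList) none (some (pvTiretA cles[i])) ≠
            PySem.List.slice (PySem.List.pyGetD cles ((i : Int) + 1) "").toList none (some (pvTiretA cles[i]))
       then (resultat ++ pvLigneA cles[i] (PySem.Dict.getD d cles[i] 0)) ++ pvSuivantA
       else resultat ++ pvLigneA cles[i] (PySem.Dict.getD d cles[i] 0))
  else resultat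
termination_by cles.length - i

def mise_en_forme (comparaisons : List (String × Int)) (str : String) : String :=
  String.ofList
    (pvBoucleA (PySem.Dict.ofList comparaisons) (PySem.Dict.keys (PySem.Dict.ofList comparaisons)) 0
      ('\n' :: str.toList ++ '\n' :: pvEnteteA))

-- ===== PORT B =====
def pvEnteteB : List Char := "\n-----------------------Premier echantillon-----------------------\n".toList
def pvSuivantB : List Char := "\n-----------------------Echantillon suivant-----------------------\n".toList
def pvLigneB (cle : String) (nb : Int) : List Char :=
  "le couple de réplicat : ".toList ++ cle.toList ++ " a un nombre de variant commun égal à : ".toList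
    ++ PySem.Int.toChars nb ++ ['\n']
-- cle.split('-', 1)[0], ported by hand on the char list: the text before the first '-'
-- (the whole string when there is none) — exact for a one-character separator
def pvPrefixeB (cle : List Char) : List Char := cle.takeWhile (fun c => c != '-')

-- pass 1 body: append to the last group when cle.startswith(prefixe(groupes[-1][-1][0])), else open a group
def pvStepB (groupes : List (List (String × Int))) (p : String × Int) : List (List (String × Int)) :=
  match groupes.getLast? with
  | some g =>
    match g.getLast? with
    | some q =>
      if PySem.Chars.startswith p.1.toList (pvPrefixeB q.1.toList)
      then groupes.dropLast ++ [g ++ [p]]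
      else groupes ++ [[p]]
    | none => groupes ++ [[p]]
  | none => groupes ++ [[p]]

-- pass 2: ''.join of the per-item lines of one group
def pvBlocB (g : List (String × Int)) : List Char := (g.map (fun p => pvLigneB p.1 p.2)).flatten

def mise_en_forme_alt (comparaisons : List (String × Int)) (str : String) : String :=
  String.ofList
    ('\n' :: str.toList ++ '\n' :: pvEnteteB ++
      PySem.Chars.join pvSuivantB
        (((PySem.Dict.ofList comparaisons).items.foldl pvStepB []).map pvBlocB))

-- ===== PRECONDITION & SPEC =====
def Spec_mise_en_forme (comparaisons : List (String × Int)) (str : String) (out : String) : Prop := out = mise_en_forme_alt comparaisons str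
instance (comparaisons : List (String × Int)) (str : String) (out : String) : Decidable (Spec_mise_en_forme comparaisons str out) := by unfold Spec_mise_en_forme; infer_instance

-- ===== CLAIM (what is proved, stated in full; the proofs are below) =====
def Claim_equal_mise_en_forme : Prop := ∀ (comparaisons : List (String × Int)) (str : String), Dom_mise_en_forme comparaisons str → Spec_mise_en_forme comparaisons str (mise_en_forme comparaisons str)

-- ===== LEMMAS AND PROOFS =====

-- the common "render the remaining items" function both programs are shown to compute
def pvRend : List (String × Int) → List Char
  | [] => []
  | (cle, nb) :: reste =>
      pvLigneB cle nb ++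
      (match reste with
       | [] => []
       | (suivante, _) :: _ =>
           if PySem.Chars.startswith suivante.toList (pvPrefixeB cle.toList) then []
           else pvSuivantB) ++
      pvRend reste

-- take up to the first '-' is takeWhile (≠ '-')
theorem pv_take_eq_takeWhile (s : List Char) (n : Nat)
    (h1 : ∀ i < n, ¬ ['-'] <+: s.drop i) (h2 : ['-'] <+: s.drop n) :
    s.take n = s.takeWhile (fun c => c != '-') := by
  induction s generalizing n with
  | nil => simp
  | cons c s ih =>
    cases n with
    | zero =>
      have hc : c = '-' := (show ('-' : Char) = c from by simpa using h2).symm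
      simp [hc]
    | succ m =>
      have hc : (c != '-') = true := by
        by_contra hcc
        exact h1 0 (by omega)
          (by simp at hcc; simp [hcc, List.cons_prefix_cons])
      rw [List.take_succ_cons, List.takeWhile_cons, if_pos hc]
      exact congrArg (c :: ·)
        (ih m (fun i hi => by simpa using h1 (i + 1) (by omega)) (by simpa using h2))

-- A's slice-comparison condition is B's startswith condition
theorem pv_cond_iff (cle nxt : String) :
    (PySem.List.slice cle.toList none (some (pvTiretA cle)) ≠
       PySem.List.slice nxt.toList none (some (pvTiretA cle))) ↔
    ¬ (PySem.Chars.startswith nxt.toList (pvPrefixeB cle.toList) = true) := by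
  obtain ⟨n, hn, hle, htake⟩ :
      ∃ n : Nat, pvTiretA cle = (n : Int) ∧ n ≤ cle.toList.length
        ∧ cle.toList.take n = pvPrefixeB cle.toList := by
    by_cases hin : PySem.Str.isIn "-" cle = true
    · have hinf : ['-'] <:+: cle.toList := by
        have h := hin
        rw [PySem.Str.isIn_eq, show ("-" : String).toList = ['-'] from by decide,
          PySem.Chars.isIn_iff_infix] at h
        exact h
      have hpos : 0 ≤ PySem.Chars.find cle.toList ['-'] :=
        (PySem.Chars.find_nonneg_iff cle.toList ['-']).mpr hinf
      obtain ⟨hpre, hmin⟩ := PySem.Chars.find_spec hpos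
      refine ⟨(PySem.Chars.find cle.toList ['-']).toNat, ?_, ?_, ?_⟩
      · rw [pvTiretA, if_pos hin, PySem.Str.find_eq,
          show ("-" : String).toList = ['-'] from by decide, Int.toNat_of_nonneg hpos]
      · have := PySem.Chars.find_le_length cle.toList ['-']; omega
      · exact pv_take_eq_takeWhile _ _ hmin hpre
    · have hmem : '-' ∉ cle.toList := by
        intro hm
        obtain ⟨l₁, l₂, he⟩ := List.append_of_mem hm
        exact hin (by
          rw [PySem.Str.isIn_eq, show ("-" : String).toList = ['-'] from by decide,
            PySem.Chars.isIn_iff_infix]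
          exact ⟨l₁, l₂, by rw [he]; simp⟩)
      refine ⟨cle.toList.length, ?_, le_refl _, ?_⟩
      · rw [pvTiretA, if_neg hin, PySem.Str.len_eq]
      · rw [List.take_length, Eq.comm, pvPrefixeB, List.takeWhile_eq_self_iff]
        intro x hx
        simp only [bne_iff_ne, ne_eq]
        exact fun hxe => hmem (hxe ▸ hx)
  have hlen : (pvPrefixeB cle.toList).length = n := by
    rw [← htake, List.length_take]; omega
  rw [hn, PySem.List.slice_to_natCast, PySem.List.slice_to_natCast, htake,
    PySem.Chars.startswith_iff, List.prefix_iff_eq_take, hlen]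

theorem pv_boucleA_eq (d : PySem.Dict String Int) (hnd : d.keys.Nodup) :
    ∀ (n i : Nat), d.items.length - i ≤ n → ∀ acc : List Char,
      pvBoucleA d d.keys i acc = acc ++ pvRend (d.items.drop i) := by
  have hkeys : d.keys = d.items.map Prod.fst := rfl
  intro n
  induction n with
  | zero =>
    intro i hi acc
    rw [pvBoucleA, dif_neg (by rw [hkeys, List.length_map]; omega),
      List.drop_eq_nil_of_le (by omega), pvRend, List.append_nil]
  | succ n ih =>
    intro i hi acc
    by_cases hlt : i < d.items.length
    · have hklt : i < d.keys.length := by rw [hkeys, List.length_map]; exact hlt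
      rw [pvBoucleA, dif_pos hklt, ih (i + 1) (by omega)]
      have hkey : d.keys[i]'hklt = (d.items[i]'hlt).1 := by
        simp [hkeys]
      have hval : PySem.Dict.getD d (d.keys[i]'hklt) 0 = (d.items[i]'hlt).2 := by
        rw [hkey]
        exact PySem.Dict.getD_of_mem_items d
          (by rw [Prod.mk.eta]; exact List.getElem_mem hlt) hnd 0
      rw [List.drop_eq_getElem_cons hlt,
        show d.items[i]'hlt = ((d.items[i]'hlt).1, (d.items[i]'hlt).2) from rfl]
      by_cases hnext : i + 1 < d.items.length
      · have hlb : (i : Int) < (d.keys.length : Int) - 1 := by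
          rw [hkeys, List.length_map]; omega
        have hget : PySem.List.pyGetD d.keys ((i : Int) + 1) "" = (d.items[i+1]'hnext).1 := by
          rw [show ((i : Int) + 1) = ((i + 1 : Nat) : Int) by push_cast; ring,
            PySem.List.pyGetD_natCast,
            List.getD_eq_getElem d.keys "" (by rw [hkeys, List.length_map]; omega)]
          simp [hkeys]
        rw [List.drop_eq_getElem_cons hnext,
          show d.items[i+1]'hnext = ((d.items[i+1]'hnext).1, (d.items[i+1]'hnext).2) from rfl]
        by_cases hc : PySem.Chars.startswith ((d.items[i+1]'hnext).1.toList)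
            (pvPrefixeB ((d.items[i]'hlt).1.toList)) = true
        · rw [if_neg (by
            rw [hkey, hget]
            intro hcontra
            exact ((pv_cond_iff _ _).mp hcontra.2) hc)]
          rw [hval, hkey]
          simp [pvRend, hc, pvLigneA, pvLigneB]
        · rw [if_pos ⟨hlb, by
            rw [hkey, hget]
            exact (pv_cond_iff _ _).mpr hc⟩]
          rw [hval, hkey]
          simp [pvRend, hc, pvLigneA, pvLigneB, pvSuivantA, pvSuivantB]
      · have hone : d.items.length = i + 1 := by omega
        rw [if_neg (by
          intro hcontra
          have := hcontra.1
          rw [hkeys, List.length_map, hone] at this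
          omega)]
        rw [List.drop_eq_nil_of_le (by omega), hval, hkey]
        simp [pvRend, pvLigneA, pvLigneB]
    · rw [pvBoucleA, dif_neg (by rw [hkeys, List.length_map]; omega),
        List.drop_eq_nil_of_le (by omega), pvRend, List.append_nil]

-- front-wise description of B's grouping fold: the rest of q's group, and the remaining groups
def pvGrp (q : String × Int) : List (String × Int) → List (String × Int) × List (List (String × Int))
  | [] => ([], [])
  | p :: l =>
      let r := pvGrp p l
      if PySem.Chars.startswith p.1.toList (pvPrefixeB q.1.toList)
      then (p :: r.1, r.2)
      else ([], (p :: r.1) :: r.2)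

theorem pv_step_fold (l : List (String × Int)) :
    ∀ (gs : List (List (String × Int))) (g : List (String × Int)) (q : String × Int),
      l.foldl pvStepB (gs ++ [g ++ [q]])
        = gs ++ [g ++ [q] ++ (pvGrp q l).1] ++ (pvGrp q l).2 := by
  induction l with
  | nil => intro gs g q; simp [pvGrp]
  | cons p l ih =>
    intro gs g q
    rw [List.foldl_cons]
    have hstep : pvStepB (gs ++ [g ++ [q]]) p =
        if PySem.Chars.startswith p.1.toList (pvPrefixeB q.1.toList)
        then gs ++ [(g ++ [q]) ++ [p]]
        else (gs ++ [g ++ [q]]) ++ [[] ++ [p]] := by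
      simp [pvStepB]
    by_cases hc : PySem.Chars.startswith p.1.toList (pvPrefixeB q.1.toList) = true
    · rw [hstep, if_pos hc, ih gs (g ++ [q]) p]
      simp [pvGrp, hc]
    · rw [hstep, if_neg hc, ih (gs ++ [g ++ [q]]) [] p]
      simp [pvGrp, hc]

theorem pv_join_prepend (sep u a : List Char) (rest : List (List Char)) :
    PySem.Chars.join sep ((u ++ a) :: rest) = u ++ PySem.Chars.join sep (a :: rest) := by
  cases rest with
  | nil => rw [PySem.Chars.join_singleton, PySem.Chars.join_singleton]
  | cons b bs =>
    rw [PySem.Chars.join_cons_cons, PySem.Chars.join_cons_cons]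
    simp

theorem pv_grp_rend (l : List (String × Int)) :
    ∀ q : String × Int,
      PySem.Chars.join pvSuivantB (((q :: (pvGrp q l).1) :: (pvGrp q l).2).map pvBlocB)
        = pvRend (q :: l) := by
  induction l with
  | nil =>
    intro q
    obtain ⟨k, v⟩ := q
    simp [pvGrp, PySem.Chars.join_singleton, pvBlocB, pvRend]
  | cons p l ih =>
    intro q
    obtain ⟨k, v⟩ := q
    by_cases hc : PySem.Chars.startswith p.1.toList (pvPrefixeB k.toList) = true
    · have hg : pvGrp (k, v) (p :: l) = (p :: (pvGrp p l).1, (pvGrp p l).2) := by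
        simp [pvGrp, hc]
      rw [hg]
      have hb : pvBlocB ((k, v) :: p :: (pvGrp p l).1)
          = pvLigneB k v ++ pvBlocB (p :: (pvGrp p l).1) := by
        simp [pvBlocB]
      rw [List.map_cons, hb, pv_join_prepend, ← List.map_cons, ih p]
      obtain ⟨k2, v2⟩ := p
      simp only [pvRend]
      simp at hc
      rw [if_pos hc]
      simp
    · have hg : ((k, v) :: (pvGrp (k, v) (p :: l)).1) :: (pvGrp (k, v) (p :: l)).2
          = [(k, v)] :: ((p :: (pvGrp p l).1) :: (pvGrp p l).2) := by
        simp [pvGrp, hc]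
      rw [hg, List.map_cons, List.map_cons, PySem.Chars.join_cons_cons, ← List.map_cons, ih p]
      obtain ⟨k2, v2⟩ := p
      simp only [pvRend]
      rw [if_neg (by simpa using hc)]
      simp [pvBlocB]

theorem pv_fold_rend (l : List (String × Int)) :
    PySem.Chars.join pvSuivantB ((l.foldl pvStepB []).map pvBlocB) = pvRend l := by
  cases l with
  | nil => simp [PySem.Chars.join_nil, pvRend]
  | cons q l =>
    rw [List.foldl_cons,
      show pvStepB [] q = [] ++ [[] ++ [q]] from by simp [pvStepB],
      pv_step_fold l [] [] q]
    simpa using pv_grp_rend l q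

-- ===== VERDICT (by name: the statement is the Claim_ definition above) =====
theorem mise_en_forme_spec : Claim_equal_mise_en_forme := by
  intro comparaisons str _
  unfold Spec_mise_en_forme mise_en_forme mise_en_forme_alt
  rw [pv_fold_rend,
    pv_boucleA_eq (PySem.Dict.ofList comparaisons) (PySem.Dict.nodup_keys_ofList comparaisons)
      (PySem.Dict.ofList comparaisons).items.length 0 (by omega)]
  simp [pvEnteteA, pvEnteteB]
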